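-- pv_equiv track=rewrite | github.com/jainesh99/microsoft_leet_code | questions/compete_states.py | cellCompete
-- ===== SOURCE A (Python) =====
-- def cellCompete(states, days):
--     def compete(left_state, right_state):
--         if left_state == right_state:
--             return 0
--         else:
--             return 1
--
--     for i in range(days):
--         result_states = []
--
--         for index, state in enumerate(states):
--             if index - 1 < 0:
--                 new_state = compete(0, states[index + 1])
--             elif index + 1 >= len(states):
--                 new_state = compete(states[index - 1], 0)
--             else:
--                 new_state = compete(states[index - 1], states[index + 1])
--
--             result_states.append(new_state)
--
--         states = result_states
--
--     return states
-- ===== SOURCE B (Python) =====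
-- def cellCompete(states, days):
--     if days <= 0:
--         return states
--     n = len(states)
--     # day 1: general equality-based step (original values may be arbitrary ints)
--     bits = [1 if (states[i - 1] if i > 0 else 0) != (states[i + 1] if i < n - 1 else 0) else 0
--             for i in range(n)]
--     # remaining days: values are 0/1, the step is XOR of neighbours -> one bitmask
--     x = 0
--     for b in reversed(bits):
--         x = (x << 1) | b
--     mask = (1 << n) - 1
--     for _ in range(days - 1):
--         x = ((x << 1) ^ (x >> 1)) & mask
--     return [(x >> i) & 1 for i in range(n)]
-- ===== Notes on version B (the rewrite author's own statement) =====
-- stated objective: faster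
-- what changed: B does the general equality-based step once, then packs the 0/1 states into one Python integer and advances each remaining day with three machine-word operations ((x<<1)^(x>>1))&mask instead of an n-element Python loop.
-- outside the precondition, e.g. on cellCompete([5], 1): A raises IndexError, B returns [0]
import Mathlib
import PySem

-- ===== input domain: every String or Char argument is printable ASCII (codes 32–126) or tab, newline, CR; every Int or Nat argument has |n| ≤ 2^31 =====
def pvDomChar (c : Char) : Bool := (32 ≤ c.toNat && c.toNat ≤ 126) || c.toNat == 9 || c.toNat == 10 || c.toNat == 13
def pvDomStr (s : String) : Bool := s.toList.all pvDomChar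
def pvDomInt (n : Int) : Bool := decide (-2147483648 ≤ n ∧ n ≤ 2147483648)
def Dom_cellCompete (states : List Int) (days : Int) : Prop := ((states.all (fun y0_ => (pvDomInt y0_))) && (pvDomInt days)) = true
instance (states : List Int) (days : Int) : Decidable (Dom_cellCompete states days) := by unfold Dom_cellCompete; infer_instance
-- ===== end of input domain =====

-- B packs the 0/1 states into a single integer bitmask and advances each day with
-- shift/xor/mask word operations instead of a per-cell Python loop (measured faster, constant factor).


-- ===== PORT A =====
def pyCompete (left_state right_state : Int) : Int :=
  if left_state == right_state then 0 else 1

def cellCompete (states : List Int) (days : Int) : List Int :=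
  (PySem.List.pyRange 0 days 1).foldl (fun states _i =>
    (PySem.List.enumerate states 0).foldl (fun result_states p =>
      let index := p.1
      let new_state :=
        if index - 1 < 0 then
          -- states[index + 1]: out of range only when len(states) = 1, where Python A raises (outside Pre_)
          pyCompete 0 (PySem.List.pyGetD states (index + 1) 0)
        else if index + 1 ≥ (states.length : Int) then
          pyCompete (PySem.List.pyGetD states (index - 1) 0) 0
        else
          pyCompete (PySem.List.pyGetD states (index - 1) 0) (PySem.List.pyGetD states (index + 1) 0)
      result_states ++ [new_state]) []) states

-- ===== PORT B =====
def cellCompete_alt (states : List Int) (days : Int) : List Int :=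
  if days ≤ 0 then states
  else
    let n := states.length
    let bits : List Int := (List.range n).map (fun i =>
      if (if 0 < i then states.getD (i - 1) 0 else 0) ≠ (if i < n - 1 then states.getD (i + 1) 0 else 0)
      then 1 else 0)
    -- x is a nonnegative Python int built from 0/1 bits, so Nat is exact here
    let x0 : Nat := bits.foldr (fun b x => (x <<< 1) ||| b.toNat) 0
    let mask : Nat := (1 <<< n) - 1
    let x : Nat := (List.range (days - 1).toNat).foldl
      (fun x _ => ((x <<< 1) ^^^ (x >>> 1)) &&& mask) x0
    (List.range n).map (fun i => (((x >>> i) &&& 1 : Nat) : Int))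

-- ===== PRECONDITION & SPEC =====
-- Pre_ excludes singleton lists with days ≥ 1: there Python A raises IndexError (states[index+1] at index 0).
def Pre_cellCompete (states : List Int) (days : Int) : Prop := ¬ (states.length = 1 ∧ 1 ≤ days)
instance (states : List Int) (days : Int) : Decidable (Pre_cellCompete states days) := by
  unfold Pre_cellCompete; infer_instance
def pvWitness_cellCompete : List Int × Int := ([1, 0, 1, 2], 3)

def Spec_cellCompete (states : List Int) (days : Int) (out : List Int) : Prop := out = cellCompete_alt states days
instance (states : List Int) (days : Int) (out : List Int) : Decidable (Spec_cellCompete states days out) := by unfold Spec_cellCompete; infer_instance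

-- ===== CLAIM (what is proved, stated in full; the proofs are below) =====
def Claim_equal_cellCompete : Prop := ∀ (states : List Int) (days : Int), Dom_cellCompete states days → Pre_cellCompete states days → Spec_cellCompete states days (cellCompete states days)

-- ===== LEMMAS AND PROOFS =====

-- left/right neighbour of cell i, with 0 outside the boundary
def nbL (l : List Int) (i : Nat) : Int := if i = 0 then 0 else l.getD (i - 1) 0
def nbR (l : List Int) (i : Nat) : Int := l.getD (i + 1) 0

-- one day of the automaton as a map over indices (characterises A's inner loop and B's first step)
def stepSpec (l : List Int) : List Int :=
  (List.range l.length).map (fun i => if nbL l i = nbR l i then 0 else 1)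

def good (l : List Int) : Prop := ∀ e ∈ l, e = 0 ∨ e = 1

def maskStep (n : Nat) (x : Nat) : Nat := ((x <<< 1) ^^^ (x >>> 1)) &&& ((1 <<< n) - 1)

def enc (l : List Int) : Nat := l.foldr (fun b x => (x <<< 1) ||| b.toNat) 0

-- x represents l bitwise: bit i is set iff cell i holds 1
def rel (x : Nat) (l : List Int) : Prop := ∀ i, x.testBit i = decide (l.getD i 0 = 1)

theorem foldl_const_iterate {α β : Type} (f : α → α) (init : α) (l : List β) :
    l.foldl (fun s _ => f s) init = f^[l.length] init := by
  induction l generalizing init with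
  | nil => simp
  | cons b t ih => simp [List.foldl_cons, ih, Function.iterate_succ_apply]

theorem good_getD (l : List Int) (h : good l) (i : Nat) : l.getD i 0 = 0 ∨ l.getD i 0 = 1 := by
  rcases lt_or_ge i l.length with hi | hi
  · rw [List.getD_eq_getElem l 0 hi]; exact h _ (List.getElem_mem hi)
  · left; exact List.getD_eq_default _ _ hi

theorem stepSpec_length (l : List Int) : (stepSpec l).length = l.length := by
  simp [stepSpec]

theorem stepSpec_good (l : List Int) : good (stepSpec l) := by
  intro e he
  simp [stepSpec] at he
  obtain ⟨i, _, hi⟩ := he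
  by_cases h : nbL l i = nbR l i <;> simp [h] at hi <;> omega

theorem andone (x i : Nat) : (x >>> i) &&& 1 = if x.testBit i then 1 else 0 := by
  rw [Nat.and_one_is_mod, Nat.testBit_eq_decide_div_mod_eq, Nat.shiftRight_eq_div_pow]
  have : x / 2 ^ i % 2 < 2 := Nat.mod_lt _ (by norm_num)
  split <;> simp_all

theorem enc_rel (l : List Int) (h : good l) : rel (enc l) l := by
  intro i
  induction l generalizing i with
  | nil => simp [enc, rel]
  | cons b t ih =>
    have hb : b = 0 ∨ b = 1 := h b (by simp)
    have ht : good t := fun e he => h e (by simp [he])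
    show ((enc t <<< 1) ||| b.toNat).testBit i = _
    cases i with
    | zero =>
      rcases hb with hb | hb <;>
        simp [hb, Nat.testBit_or, Nat.testBit_shiftLeft, List.getD]
    | succ j =>
      have hbn : b.toNat ≤ 1 := by rcases hb with hb | hb <;> simp [hb]
      have hfb : b.toNat.testBit (j+1) = false := by
        apply Nat.testBit_lt_two_pow
        calc b.toNat < 2 ^ 1 := by omega
          _ ≤ 2 ^ (j+1) := Nat.pow_le_pow_right (by norm_num) (by omega)
      simp [Nat.testBit_or, Nat.testBit_shiftLeft, hfb, ih ht, List.getD]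

theorem maskStep_testBit (n x i : Nat) :
    (maskStep n x).testBit i
      = (decide (i < n) && ((decide (1 ≤ i) && x.testBit (i-1)).xor (x.testBit (i+1)))) := by
  simp [maskStep, Nat.testBit_and, Nat.testBit_xor, Nat.testBit_shiftLeft,
    Nat.testBit_shiftRight, Nat.one_shiftLeft, Nat.testBit_two_pow_sub_one, Nat.add_comm 1 i]

theorem stepSpec_getD (l : List Int) (hg : good l) (i : Nat) :
    decide ((stepSpec l).getD i 0 = 1)
      = (decide (i < l.length) && ((decide (1 ≤ i) && decide (l.getD (i-1) 0 = 1)).xor (decide (l.getD (i+1) 0 = 1)))) := by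
  rcases lt_or_ge i l.length with hi | hi
  · have hrw : (stepSpec l).getD i 0 = if nbL l i = nbR l i then 0 else 1 := by
      rw [List.getD_eq_getElem _ 0 (by simp [stepSpec]; exact hi)]
      simp [stepSpec]
    rw [hrw]
    rcases good_getD l hg (i-1) with h1 | h1 <;> rcases good_getD l hg (i+1) with h2 | h2 <;>
      rcases Nat.eq_zero_or_pos i with hz | hz <;>
      simp only [List.getD, hz] at h1 h2 <;>
      simp [nbL, nbR, hz, h1, h2, hi, Nat.one_le_iff_ne_zero] <;> omega
  · have hrw : (stepSpec l).getD i 0 = 0 := List.getD_eq_default _ _ (by simp [stepSpec]; exact hi)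
    rw [hrw]; simp [Nat.not_lt.2 hi]

theorem maskStep_rel (n : Nat) (x : Nat) (l : List Int) (hg : good l) (hn : l.length = n)
    (hr : rel x l) : rel (maskStep n x) (stepSpec l) := by
  intro i
  rw [maskStep_testBit, stepSpec_getD l hg i, hr (i-1), hr (i+1), hn]

theorem decode_rel (x : Nat) (l : List Int) (hg : good l) (hr : rel x l) :
    (List.range l.length).map (fun i => (((x >>> i) &&& 1 : Nat) : Int)) = l := by
  apply List.ext_getElem (by simp)
  intro i hi hil
  simp only [List.getElem_map, List.getElem_range]
  rw [andone x i]
  have hb := hr i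
  rw [List.getD_eq_getElem l 0 hil] at hb
  rcases hg _ (List.getElem_mem hil) with h | h <;> simp [h] at hb ⊢ <;> simp [hb]

theorem loop_rel (n : Nat) (k : Nat) (l : List Int) (x : Nat)
    (hg : good l) (hn : l.length = n) (hr : rel x l) :
    rel ((maskStep n)^[k] x) (stepSpec^[k] l) ∧ good (stepSpec^[k] l) ∧ (stepSpec^[k] l).length = n := by
  induction k generalizing l x with
  | zero => exact ⟨hr, hg, hn⟩
  | succ m ih =>
    rw [Function.iterate_succ_apply, Function.iterate_succ_apply]
    exact ih (stepSpec l) (maskStep n x) (stepSpec_good l)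
      (by rw [stepSpec_length]; exact hn) (maskStep_rel n x l hg hn hr)

-- B's first-day comprehension equals stepSpec
theorem bitsB_eq (l : List Int) :
    (List.range l.length).map (fun i =>
      if (if 0 < i then l.getD (i - 1) 0 else 0) ≠ (if i < l.length - 1 then l.getD (i + 1) 0 else 0)
      then 1 else 0) = stepSpec l := by
  unfold stepSpec
  apply List.map_congr_left
  intro i hi
  rw [List.mem_range] at hi
  have hR : (if i < l.length - 1 then l.getD (i + 1) 0 else 0) = nbR l i := by
    unfold nbR
    split
    · rfl
    · have : l.length ≤ i + 1 := by omega
      rw [List.getD_eq_default _ _ this]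
  have hL : (if 0 < i then l.getD (i - 1) 0 else 0) = nbL l i := by
    unfold nbL
    rcases Nat.eq_zero_or_pos i with h | h
    · simp [h]
    · rw [if_pos h, if_neg (Nat.pos_iff_ne_zero.mp h)]
  rw [hL, hR]
  by_cases h : nbL l i = nbR l i <;> simp [h]

-- A's inner (per-day) loop equals stepSpec
theorem innerA_eq (l : List Int) :
    (PySem.List.enumerate l 0).foldl (fun result_states p =>
      let index := p.1
      let new_state :=
        if index - 1 < 0 then
          pyCompete 0 (PySem.List.pyGetD l (index + 1) 0)
        else if index + 1 ≥ (l.length : Int) then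
          pyCompete (PySem.List.pyGetD l (index - 1) 0) 0
        else
          pyCompete (PySem.List.pyGetD l (index - 1) 0) (PySem.List.pyGetD l (index + 1) 0)
      result_states ++ [new_state]) [] = stepSpec l := by
  rw [PySem.List.foldl_append_singleton_eq_map]
  have h1 : (PySem.List.enumerate l 0).map (fun p =>
      let index := p.1
      if index - 1 < 0 then
          pyCompete 0 (PySem.List.pyGetD l (index + 1) 0)
        else if index + 1 ≥ (l.length : Int) then
          pyCompete (PySem.List.pyGetD l (index - 1) 0) 0
        else
          pyCompete (PySem.List.pyGetD l (index - 1) 0) (PySem.List.pyGetD l (index + 1) 0))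
      = ((PySem.List.enumerate l 0).map (·.1)).map (fun index =>
        if index - 1 < 0 then
          pyCompete 0 (PySem.List.pyGetD l (index + 1) 0)
        else if index + 1 ≥ (l.length : Int) then
          pyCompete (PySem.List.pyGetD l (index - 1) 0) 0
        else
          pyCompete (PySem.List.pyGetD l (index - 1) 0) (PySem.List.pyGetD l (index + 1) 0)) := by
    rw [List.map_map]; rfl
  rw [List.nil_append, h1, PySem.List.map_fst_enumerate, PySem.List.pyRange_one]
  unfold stepSpec
  simp only [List.map_map, zero_add, Int.toNat_natCast]
  apply List.map_congr_left
  intro i hi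
  rw [List.mem_range] at hi
  simp only [Function.comp, zero_add]
  rcases Nat.eq_zero_or_pos i with hz | hz
  · subst hz
    rw [if_pos (by norm_num : ((0:Nat):Int) - 1 < 0)]
    unfold pyCompete nbL nbR
    have hc : ((0:Nat):Int) + 1 = ((1:Nat):Int) := by norm_num
    rw [hc, PySem.List.pyGetD_natCast]
    simp [beq_iff_eq]
  · have hnz : ¬ ((i:Int) - 1 < 0) := by omega
    rw [if_neg hnz]
    have hcast1 : (i:Int) - 1 = ((i-1 : Nat) : Int) := by omega
    have hcast2 : (i:Int) + 1 = ((i+1 : Nat) : Int) := by omega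
    by_cases hlast : (i:Int) + 1 ≥ (l.length : Int)
    · rw [if_pos hlast]
      unfold pyCompete nbL nbR
      rw [hcast1, PySem.List.pyGetD_natCast]
      rw [List.getD_eq_default _ _ (by omega : l.length ≤ i + 1)]
      simp [Nat.pos_iff_ne_zero.mp hz, beq_iff_eq]
    · rw [if_neg hlast]
      unfold pyCompete nbL nbR
      rw [hcast1, hcast2, PySem.List.pyGetD_natCast, PySem.List.pyGetD_natCast]
      simp [Nat.pos_iff_ne_zero.mp hz, beq_iff_eq]

theorem cellCompete_eq_iter (states : List Int) (days : Int) :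
    cellCompete states days = stepSpec^[days.toNat] states := by
  unfold cellCompete
  rw [foldl_const_iterate]
  have hf : (fun (states : List Int) =>
      (PySem.List.enumerate states 0).foldl (fun result_states p =>
        let index := p.1
        let new_state :=
          if index - 1 < 0 then
            pyCompete 0 (PySem.List.pyGetD states (index + 1) 0)
          else if index + 1 ≥ (states.length : Int) then
            pyCompete (PySem.List.pyGetD states (index - 1) 0) 0
          else
            pyCompete (PySem.List.pyGetD states (index - 1) 0) (PySem.List.pyGetD states (index + 1) 0)
        result_states ++ [new_state]) []) = stepSpec := funext innerA_eq
  rw [hf, PySem.List.length_pyRange_one]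
  norm_num

theorem alt_eq_iter (states : List Int) (days : Int) (h : 1 ≤ days) :
    cellCompete_alt states days = stepSpec^[days.toNat] states := by
  unfold cellCompete_alt
  rw [if_neg (by omega : ¬ days ≤ 0)]
  simp only [bitsB_eq]
  show (List.range states.length).map
      (fun i => ((((List.range (days - 1).toNat).foldl
        (fun x _ => maskStep states.length x) (enc (stepSpec states)) >>> i) &&& 1 : Nat) : Int))
      = stepSpec^[days.toNat] states
  rw [foldl_const_iterate, List.length_range]
  have hg : good (stepSpec states) := stepSpec_good states
  obtain ⟨hr', hg', hn'⟩ := loop_rel states.length (days - 1).toNat (stepSpec states)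
    (enc (stepSpec states)) hg (stepSpec_length states) (enc_rel _ hg)
  rw [show List.range states.length
      = List.range (stepSpec^[(days - 1).toNat] (stepSpec states)).length by rw [hn']]
  rw [decode_rel _ _ hg' hr']
  have hd : days.toNat = (days - 1).toNat + 1 := by omega
  rw [hd, Function.iterate_succ_apply]

-- ===== VERDICT (by name: the statement is the Claim_ definition above) =====
theorem cellCompete_spec : Claim_equal_cellCompete := by
  unfold Claim_equal_cellCompete
  intro states days _ _
  unfold Spec_cellCompete
  by_cases h : days ≤ 0
  · unfold cellCompete cellCompete_alt
    rw [if_pos h, PySem.List.pyRange_one_eq_nil (by omega), List.foldl_nil]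
  · rw [cellCompete_eq_iter, alt_eq_iter states days (by omega)]
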